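-- pv_equiv track=rewrite | github.com/caolele/adhoc-stuff | peak/the-hurdle-race.py | hurdleRace
-- ===== SOURCE A (Python) =====
-- def maxheap_insert(heap, v):
--     heap.append(v)
--     idx = len(heap) - 1
--     while idx != 0:
--         parent_idx = (idx - 1) // 2
--         if heap[parent_idx] < heap[idx]:
--             heap[parent_idx], heap[idx] = heap[idx], heap[parent_idx]
--         else:
--             return
--         idx = parent_idx
--
-- def hurdleRace(k, height):
--     # construct a max heap
--     maxheap = []
--     for h in height:
--         maxheap_insert(maxheap, h)
--     # calculate the final result
--     max_height = maxheap[0]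
--     if k >= max_height:
--         return 0
--     else:
--         return max_height - k
-- ===== SOURCE B (Python) =====
-- def hurdleRace(k, height):
--     m = height[0]
--     for h in height[1:]:
--         if m < h:
--             m = h
--     return max(0, m - k)
-- ===== Notes on version B (the rewrite author's own statement) =====
-- stated objective: simpler
-- what changed: Replaces the hand-built binary max-heap (repeated sift-up insertions, then reading the root) with a single linear running-maximum scan, returning max(0, m - k).
import Mathlib
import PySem

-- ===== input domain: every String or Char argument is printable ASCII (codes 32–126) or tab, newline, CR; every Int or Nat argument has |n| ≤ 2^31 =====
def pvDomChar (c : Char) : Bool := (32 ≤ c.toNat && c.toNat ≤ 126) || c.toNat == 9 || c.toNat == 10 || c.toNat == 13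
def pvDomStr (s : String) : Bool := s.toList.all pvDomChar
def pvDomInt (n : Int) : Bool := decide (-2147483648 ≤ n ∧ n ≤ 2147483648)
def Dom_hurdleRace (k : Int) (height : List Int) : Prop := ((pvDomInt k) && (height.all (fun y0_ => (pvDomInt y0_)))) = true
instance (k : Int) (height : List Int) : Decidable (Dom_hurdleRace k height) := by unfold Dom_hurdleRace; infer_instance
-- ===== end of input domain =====

-- B replaces A's hand-built binary max-heap with a single linear running-maximum scan (simpler).


-- ===== PORT A =====
-- heap[p], heap[i] in maxheap_insert are always in range, so getD is exact there.
def pvSwap (l : List Int) (p i : Nat) : List Int :=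
  (l.set p (l.getD i 0)).set i (l.getD p 0)

-- the while-loop of maxheap_insert (idx descends to a parent each iteration)
def pvSiftUp (l : List Int) (idx : Nat) : List Int :=
  if h : idx = 0 then l
  else
    let p := (idx - 1) / 2
    if l.getD p 0 < l.getD idx 0 then pvSiftUp (pvSwap l p idx) p else l
termination_by idx
decreasing_by omega

def pvMaxheapInsert (heap : List Int) (v : Int) : List Int :=
  pvSiftUp (heap ++ [v]) heap.length

def hurdleRace (k : Int) (height : List Int) : Int :=
  let maxheap := height.foldl pvMaxheapInsert []
  match PySem.List.pyGet? maxheap 0 with   -- maxheap[0]; none = IndexError, excluded by Pre_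
  | none => 0
  | some maxHeight => if k ≥ maxHeight then 0 else maxHeight - k

-- ===== PORT B =====
def hurdleRace_alt (k : Int) (height : List Int) : Int :=
  match height with
  | [] => 0   -- height[0] raises IndexError; excluded by Pre_
  | h :: t => max 0 ((t.foldl (fun m x => if m < x then x else m) h) - k)

-- ===== PRECONDITION & SPEC =====
-- A raises IndexError on the empty list (maxheap[0]); B does the same (height[0]); excluded.
def Pre_hurdleRace (k : Int) (height : List Int) : Prop := height ≠ []
instance (k : Int) (height : List Int) : Decidable (Pre_hurdleRace k height) := by unfold Pre_hurdleRace; infer_instance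
def pvWitness_hurdleRace : Int × List Int := (3, [1, 5, 2])

def Spec_hurdleRace (k : Int) (height : List Int) (out : Int) : Prop := out = hurdleRace_alt k height
instance (k : Int) (height : List Int) (out : Int) : Decidable (Spec_hurdleRace k height out) := by unfold Spec_hurdleRace; infer_instance

-- ===== CLAIM (what is proved, stated in full; the proofs are below) =====
def Claim_equal_hurdleRace : Prop := ∀ (k : Int) (height : List Int), Dom_hurdleRace k height → Pre_hurdleRace k height → Spec_hurdleRace k height (hurdleRace k height)

-- ===== LEMMAS AND PROOFS =====

-- "heap is a nonempty list whose head dominates every element"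
def pvGood (l : List Int) : Prop :=
  0 < l.length ∧ ∀ j, j < l.length → l.getD j 0 ≤ l.getD 0 0

lemma pvSwap_length (l : List Int) (p i : Nat) : (pvSwap l p i).length = l.length := by
  simp [pvSwap]

lemma pvSwap_getD (l : List Int) (p i j : Nat) (hp : p < l.length) (hi : i < l.length) :
    (pvSwap l p i).getD j 0 =
      if j = i then l.getD p 0 else if j = p then l.getD i 0 else l.getD j 0 := by
  unfold pvSwap
  simp only [List.getD, List.getElem?_set]
  by_cases hji : j = i
  · subst hji
    simp [hi]
  · by_cases hjp : j = p
    · subst hjp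
      simp [Ne.symm hji, hp, hji]
    · simp [Ne.symm hji, Ne.symm hjp, hji, hjp]

lemma pvSiftUp_spec :
    ∀ idx l (m v : Int), idx ≠ 0 → idx < l.length →
    l.getD idx 0 = v →
    l.getD 0 0 = m →
    (∀ j, j < l.length → j ≠ idx → l.getD j 0 ≤ m) →
    (pvSiftUp l idx).length = l.length ∧
    (pvSiftUp l idx).getD 0 0 = max m v ∧
    (∀ j, j < (pvSiftUp l idx).length → (pvSiftUp l idx).getD j 0 ≤ max m v) := by
  intro idx
  induction idx using Nat.strong_induction_on with
  | _ idx IH =>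
    intro l m v hidx hlt hv h0 hall
    rw [pvSiftUp]
    simp only [hidx, dite_false]
    have hplt : (idx - 1) / 2 < idx := by omega
    have hpl : (idx - 1) / 2 < l.length := by omega
    by_cases hc : l.getD ((idx - 1) / 2) 0 < l.getD idx 0
    · simp only [hc, if_true]
      have hpv : (pvSwap l ((idx - 1) / 2) idx).getD ((idx - 1) / 2) 0 = v := by
        rw [pvSwap_getD l _ idx _ hpl hlt, if_neg (Nat.ne_of_lt hplt), if_pos rfl]
        exact hv
      by_cases hp0 : (idx - 1) / 2 = 0
      · -- swapped with the root: the loop exits immediately at idx = 0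
        rw [hp0]
        rw [hp0] at hpv hc
        rw [pvSiftUp]
        simp only [dite_true]
        have hm_lt : m < v := by rw [← h0, ← hv]; exact hc
        refine ⟨pvSwap_length l 0 idx, ?_, ?_⟩
        · rw [hpv]; omega
        · intro j hj
          rw [pvSwap_length] at hj
          rw [pvSwap_getD l 0 idx j (by omega) hlt]
          split_ifs with h1 h2
          · rw [h0]; omega
          · rw [hv]; omega
          · have := hall j hj h1; omega
      · -- continue sifting from the parent position
        have h0' : (pvSwap l ((idx - 1) / 2) idx).getD 0 0 = m := by
          rw [pvSwap_getD l _ idx 0 hpl hlt, if_neg (Ne.symm hidx), if_neg (Ne.symm hp0)]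
          exact h0
        have hall' : ∀ j, j < (pvSwap l ((idx - 1) / 2) idx).length → j ≠ (idx - 1) / 2 →
            (pvSwap l ((idx - 1) / 2) idx).getD j 0 ≤ m := by
          intro j hj hjp
          rw [pvSwap_length] at hj
          rw [pvSwap_getD l _ idx j hpl hlt]
          split_ifs with h1
          · exact hall _ hpl (Nat.ne_of_lt hplt)
          · exact hall j hj h1
        have := IH _ hplt (pvSwap l ((idx - 1) / 2) idx) m v hp0
          (by rw [pvSwap_length]; omega) hpv h0' hall'
        rwa [pvSwap_length] at this
    · -- parent already ≥ inserted value: loop exits, list unchanged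
      simp only [hc, if_false]
      have hvm : v ≤ m := by
        have h1 := hall _ hpl (Nat.ne_of_lt hplt)
        rw [hv] at hc; omega
      refine ⟨by simp, by rw [h0]; omega, ?_⟩
      intro j hj
      by_cases hji : j = idx
      · rw [hji, hv]; omega
      · have := hall j hj hji; omega

lemma pvInsert_spec (heap : List Int) (v : Int) (hg : pvGood heap) :
    pvGood (pvMaxheapInsert heap v) ∧
    (pvMaxheapInsert heap v).getD 0 0 = max (heap.getD 0 0) v := by
  obtain ⟨hlen, hdom⟩ := hg
  have hidx : heap.length ≠ 0 := by omega
  have hlt : heap.length < (heap ++ [v]).length := by simp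
  have hv : (heap ++ [v]).getD heap.length 0 = v := by
    simp [List.getD]
  have h0 : (heap ++ [v]).getD 0 0 = heap.getD 0 0 := by
    cases heap with
    | nil => simp at hlen
    | cons a t => simp [List.getD]
  have hall : ∀ j, j < (heap ++ [v]).length → j ≠ heap.length →
      (heap ++ [v]).getD j 0 ≤ heap.getD 0 0 := by
    intro j hj hjne
    have hjl : j < heap.length := by simp at hj; omega
    have heq : (heap ++ [v]).getD j 0 = heap.getD j 0 := by
      simp [List.getD, List.getElem?_append_left hjl]
    rw [heq]; exact hdom j hjl
  obtain ⟨h1, h2, h3⟩ := pvSiftUp_spec heap.length (heap ++ [v]) (heap.getD 0 0) v hidx hlt hv h0 hall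
  unfold pvMaxheapInsert
  refine ⟨⟨by rw [h1]; simp, ?_⟩, h2⟩
  intro j hj
  rw [h2]
  exact h3 j hj

lemma pvFold_spec :
    ∀ (t : List Int) (heap : List Int), pvGood heap →
    pvGood (t.foldl pvMaxheapInsert heap) ∧
    (t.foldl pvMaxheapInsert heap).getD 0 0 =
      t.foldl (fun m x => if m < x then x else m) (heap.getD 0 0) := by
  intro t
  induction t with
  | nil => intro heap hg; exact ⟨hg, rfl⟩
  | cons a t IH =>
    intro heap hg
    obtain ⟨hg', hhead⟩ := pvInsert_spec heap a hg
    obtain ⟨hg'', heq⟩ := IH (pvMaxheapInsert heap a) hg'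
    refine ⟨hg'', ?_⟩
    simp only [List.foldl_cons]
    rw [heq, hhead]
    congr 1
    rw [max_def]
    split_ifs <;> omega

lemma pvGood_singleton (v : Int) : pvGood [v] := by
  constructor
  · simp
  · intro j hj; simp at hj; subst hj; simp

lemma pvInsert_nil (v : Int) : pvMaxheapInsert [] v = [v] := by
  simp [pvMaxheapInsert, pvSiftUp]

-- ===== VERDICT (by name: the statement is the Claim_ definition above) =====
theorem hurdleRace_spec : Claim_equal_hurdleRace := by
  intro k height _ hpre
  match height with
  | [] => exact absurd rfl hpre
  | h :: t =>
    unfold Spec_hurdleRace hurdleRace hurdleRace_alt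
    simp only [List.foldl_cons, pvInsert_nil]
    obtain ⟨⟨hlen, _⟩, heq⟩ := pvFold_spec t [h] (pvGood_singleton h)
    have hh : ([h] : List Int).getD 0 0 = h := rfl
    rw [hh] at heq
    have hget : PySem.List.pyGet? (t.foldl pvMaxheapInsert [h]) (0 : Int) =
        some ((t.foldl pvMaxheapInsert [h]).getD 0 0) := by
      cases hL : t.foldl pvMaxheapInsert [h] with
      | nil => rw [hL] at hlen; simp at hlen
      | cons x xs => simp [PySem.List.pyGet?, PySem.List.pyIdx?, List.getD]
    rw [hget]
    show (if k ≥ (t.foldl pvMaxheapInsert [h]).getD 0 0 then 0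
          else (t.foldl pvMaxheapInsert [h]).getD 0 0 - k) =
      max 0 ((t.foldl (fun m x => if m < x then x else m) h) - k)
    rw [heq]
    split_ifs with hk <;> omega
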